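-- pv_equiv track=rewrite | github.com/ahmedarafa994/chimera | backend-api/app/services/autodan_x/mutation_engine.py | _parse_prompt_structure
-- ===== SOURCE A (Python) =====
-- from typing import Any, ClassVar
--
-- def _parse_prompt_structure(prompt: str) -> dict[str, str]:
--     """Parse prompt into structural components."""
--     lines = prompt.split("\n")
--
--     header_lines: ClassVar[list] = []
--     body_lines: ClassVar[list] = []
--     suffix_lines: ClassVar[list] = []
--
--     section = "header"
--
--     for line in lines:
--         line_lower = line.lower()
--
--         # Detect section transitions
--         if section == "header":
--             if any(
--                 marker in line_lower
--                 for marker in ["task:", "request:", "question:", "analyze:"]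
--             ):
--                 section = "body"
--                 body_lines.append(line)
--             else:
--                 header_lines.append(line)
--         elif section == "body":
--             if any(
--                 marker in line_lower for marker in ["note:", "important:", "---", "output:"]
--             ):
--                 section = "suffix"
--                 suffix_lines.append(line)
--             else:
--                 body_lines.append(line)
--         else:
--             suffix_lines.append(line)
--
--     return {
--         "header": "\n".join(header_lines),
--         "body": "\n".join(body_lines),
--         "suffix": "\n".join(suffix_lines),
--     }
-- ===== SOURCE B (Python) =====
-- BODY_MARKERS = ("task:", "request:", "question:", "analyze:")
-- SUFFIX_MARKERS = ("note:", "important:", "---", "output:")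
--
--
-- def _hit(line, markers):
--     ll = line.lower()
--     return any(m in ll for m in markers)
--
--
-- def _parse_prompt_structure(prompt: str) -> dict[str, str]:
--     """Index-based split: i = first body-marker line, j = first suffix-marker line after i."""
--     lines = prompt.split("\n")
--     n = len(lines)
--     i = next((k for k in range(n) if _hit(lines[k], BODY_MARKERS)), n)
--     j = next((k for k in range(i + 1, n) if _hit(lines[k], SUFFIX_MARKERS)), n)
--     return {
--         "header": "\n".join(lines[:i]),
--         "body": "\n".join(lines[i:j]),
--         "suffix": "\n".join(lines[j:]),
--     }
-- ===== Notes on version B (the rewrite author's own statement) =====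
-- stated objective: simpler
-- what changed: Replaced A's running section state machine over the lines with computing two split indices (first body-marker line i, first suffix-marker line j >= i+1) and slicing the line list.
import Mathlib
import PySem

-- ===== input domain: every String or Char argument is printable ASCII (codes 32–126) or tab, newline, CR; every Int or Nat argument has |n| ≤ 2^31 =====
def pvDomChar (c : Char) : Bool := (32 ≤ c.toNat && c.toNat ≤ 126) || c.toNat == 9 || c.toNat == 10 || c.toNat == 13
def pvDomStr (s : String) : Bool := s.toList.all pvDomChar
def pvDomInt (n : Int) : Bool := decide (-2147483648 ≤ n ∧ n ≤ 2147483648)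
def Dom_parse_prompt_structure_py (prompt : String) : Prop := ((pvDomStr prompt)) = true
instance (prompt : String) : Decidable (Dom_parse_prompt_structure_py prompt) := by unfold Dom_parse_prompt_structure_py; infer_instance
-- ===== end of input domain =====

-- B replaces A's running section state machine by computing the two split indices
-- (first body-marker line, first suffix-marker line after it) and slicing; objective: simpler decomposition.

-- ===== PORT A =====
-- state = (section, header_lines, body_lines, suffix_lines), exactly A's loop state
def pvStepA (st : String × List String × List String × List String) (line : String) :
    String × List String × List String × List String :=
  let sec := st.1
  let ll := PySem.Str.lower line
  if sec = "header" then
    if ["task:", "request:", "question:", "analyze:"].any (fun m => PySem.Str.isIn m ll) then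
      ("body", st.2.1, st.2.2.1 ++ [line], st.2.2.2)
    else
      (sec, st.2.1 ++ [line], st.2.2.1, st.2.2.2)
  else if sec = "body" then
    if ["note:", "important:", "---", "output:"].any (fun m => PySem.Str.isIn m ll) then
      ("suffix", st.2.1, st.2.2.1, st.2.2.2 ++ [line])
    else
      (sec, st.2.1, st.2.2.1 ++ [line], st.2.2.2)
  else
    (sec, st.2.1, st.2.2.1, st.2.2.2 ++ [line])

def parse_prompt_structure_py (prompt : String) : List (String × String) :=
  let lines := (PySem.Str.split? prompt "\n").getD []
  let st := List.foldl pvStepA ("header", [], [], []) lines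
  [("header", PySem.Str.join "\n" st.2.1),
   ("body", PySem.Str.join "\n" st.2.2.1),
   ("suffix", PySem.Str.join "\n" st.2.2.2)]

-- ===== PORT B =====
def pvHit (markers : List String) (line : String) : Bool :=
  let ll := PySem.Str.lower line
  markers.any (fun m => PySem.Str.isIn m ll)

def pvBodyMarkers : List String := ["task:", "request:", "question:", "analyze:"]
def pvSuffixMarkers : List String := ["note:", "important:", "---", "output:"]

def parse_prompt_structure_py_alt (prompt : String) : List (String × String) :=
  let lines := (PySem.Str.split? prompt "\n").getD []
  let n := lines.length
  let i := (lines.findIdx? (pvHit pvBodyMarkers)).getD n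
  let j := match (lines.drop (i + 1)).findIdx? (pvHit pvSuffixMarkers) with
           | some k => i + 1 + k
           | none => n
  [("header", PySem.Str.join "\n" (lines.take i)),
   ("body", PySem.Str.join "\n" ((lines.drop i).take (j - i))),
   ("suffix", PySem.Str.join "\n" (lines.drop j))]

-- ===== PRECONDITION & SPEC =====
def Spec_parse_prompt_structure_py (prompt : String) (out : List (String × String)) : Prop := out = parse_prompt_structure_py_alt prompt
instance (prompt : String) (out : List (String × String)) : Decidable (Spec_parse_prompt_structure_py prompt out) := by unfold Spec_parse_prompt_structure_py; infer_instance

-- ===== CLAIM (what is proved, stated in full; the proofs are below) =====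
def Claim_equal_parse_prompt_structure_py : Prop := ∀ (prompt : String), Dom_parse_prompt_structure_py prompt → Spec_parse_prompt_structure_py prompt (parse_prompt_structure_py prompt)

-- ===== LEMMAS AND PROOFS =====
def pvI (ls : List String) : Nat := (ls.findIdx? (pvHit pvBodyMarkers)).getD ls.length
def pvK (ls : List String) : Nat := (ls.findIdx? (pvHit pvSuffixMarkers)).getD ls.length
def pvJ (ls : List String) : Nat :=
  match (ls.drop (pvI ls + 1)).findIdx? (pvHit pvSuffixMarkers) with
  | some k => pvI ls + 1 + k
  | none => ls.length


theorem pvStepA_header_pos (l : String) (h b s : List String)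
    (hl : pvHit pvBodyMarkers l = true) :
    pvStepA ("header", h, b, s) l = ("body", h, b ++ [l], s) := by
  simp [pvHit, pvBodyMarkers] at hl
  simp [pvStepA, hl]

theorem pvStepA_header_neg (l : String) (h b s : List String)
    (hl : pvHit pvBodyMarkers l = false) :
    pvStepA ("header", h, b, s) l = ("header", h ++ [l], b, s) := by
  simp [pvHit, pvBodyMarkers] at hl
  simp [pvStepA, hl]

theorem pvStepA_body_pos (l : String) (h b s : List String)
    (hl : pvHit pvSuffixMarkers l = true) :
    pvStepA ("body", h, b, s) l = ("suffix", h, b, s ++ [l]) := by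
  simp [pvHit, pvSuffixMarkers] at hl
  simp [pvStepA, hl]

theorem pvStepA_body_neg (l : String) (h b s : List String)
    (hl : pvHit pvSuffixMarkers l = false) :
    pvStepA ("body", h, b, s) l = ("body", h, b ++ [l], s) := by
  simp [pvHit, pvSuffixMarkers] at hl
  simp [pvStepA, hl]

theorem pv_suffix_foldl (ls : List String) (h b s : List String) :
    List.foldl pvStepA ("suffix", h, b, s) ls = ("suffix", h, b, s ++ ls) := by
  induction ls generalizing s with
  | nil => simp
  | cons l t ih => simp [pvStepA, ih]

theorem pvK_cons_pos (l : String) (ls : List String) (hl : pvHit pvSuffixMarkers l = true) :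
    pvK (l :: ls) = 0 := by
  simp [pvK, List.findIdx?_cons, hl]

theorem pvK_cons_neg (l : String) (ls : List String) (hl : pvHit pvSuffixMarkers l = false) :
    pvK (l :: ls) = pvK ls + 1 := by
  simp only [pvK, List.findIdx?_cons, hl, Bool.false_eq_true, if_false, List.length_cons]
  cases List.findIdx? (pvHit pvSuffixMarkers) ls <;> simp

theorem pv_body_foldl (ls : List String) (h b s : List String) :
    (List.foldl pvStepA ("body", h, b, s) ls).2 =
      (h, b ++ ls.take (pvK ls), s ++ ls.drop (pvK ls)) := by
  induction ls generalizing b s with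
  | nil => simp [pvK]
  | cons l t ih =>
    by_cases hl : pvHit pvSuffixMarkers l = true
    · have hstep : List.foldl pvStepA ("body", h, b, s) (l :: t) =
          List.foldl pvStepA ("suffix", h, b, s ++ [l]) t := by
        rw [List.foldl_cons, pvStepA_body_pos l h b s hl]
      rw [hstep, pv_suffix_foldl, pvK_cons_pos l t hl]
      simp
    · have hl' : pvHit pvSuffixMarkers l = false := by simpa using hl
      have hstep : List.foldl pvStepA ("body", h, b, s) (l :: t) =
          List.foldl pvStepA ("body", h, b ++ [l], s) t := by
        rw [List.foldl_cons, pvStepA_body_neg l h b s hl']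
      rw [hstep, ih, pvK_cons_neg l t hl']
      simp

theorem pvI_cons_pos (l : String) (ls : List String) (hl : pvHit pvBodyMarkers l = true) :
    pvI (l :: ls) = 0 := by
  simp [pvI, List.findIdx?_cons, hl]

theorem pvI_cons_neg (l : String) (ls : List String) (hl : pvHit pvBodyMarkers l = false) :
    pvI (l :: ls) = pvI ls + 1 := by
  simp only [pvI, List.findIdx?_cons, hl, Bool.false_eq_true, if_false, List.length_cons]
  cases List.findIdx? (pvHit pvBodyMarkers) ls <;> simp

theorem pvJ_cons_pos (l : String) (ls : List String) (hl : pvHit pvBodyMarkers l = true) :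
    pvJ (l :: ls) = pvK ls + 1 := by
  simp only [pvJ, pvI_cons_pos l ls hl, pvK, List.length_cons, Nat.zero_add, List.drop_succ_cons,
    List.drop_zero]
  cases List.findIdx? (pvHit pvSuffixMarkers) ls <;> simp <;> omega

theorem pvJ_cons_neg (l : String) (ls : List String) (hl : pvHit pvBodyMarkers l = false) :
    pvJ (l :: ls) = pvJ ls + 1 := by
  simp only [pvJ, pvI_cons_neg l ls hl, List.length_cons, List.drop_succ_cons]
  cases List.findIdx? (pvHit pvSuffixMarkers) (ls.drop (pvI ls + 1)) <;> simp <;> omega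

theorem pv_header_foldl (ls : List String) (h b s : List String) :
    (List.foldl pvStepA ("header", h, b, s) ls).2 =
      (h ++ ls.take (pvI ls),
       b ++ (ls.drop (pvI ls)).take (pvJ ls - pvI ls),
       s ++ ls.drop (pvJ ls)) := by
  induction ls generalizing h with
  | nil => simp [pvI, pvJ]
  | cons l t ih =>
    by_cases hl : pvHit pvBodyMarkers l = true
    · have hstep : List.foldl pvStepA ("header", h, b, s) (l :: t) =
          List.foldl pvStepA ("body", h, b ++ [l], s) t := by
        rw [List.foldl_cons, pvStepA_header_pos l h b s hl]
      rw [hstep, pv_body_foldl, pvI_cons_pos l t hl, pvJ_cons_pos l t hl]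
      simp
    · have hl' : pvHit pvBodyMarkers l = false := by simpa using hl
      have hstep : List.foldl pvStepA ("header", h, b, s) (l :: t) =
          List.foldl pvStepA ("header", h ++ [l], b, s) t := by
        rw [List.foldl_cons, pvStepA_header_neg l h b s hl']
      rw [hstep, ih, pvI_cons_neg l t hl', pvJ_cons_neg l t hl']
      have : pvJ t + 1 - (pvI t + 1) = pvJ t - pvI t := by omega
      simp [this]

-- ===== VERDICT (by name: the statement is the Claim_ definition above) =====
theorem parse_prompt_structure_py_spec : Claim_equal_parse_prompt_structure_py := by
  intro prompt _
  unfold Spec_parse_prompt_structure_py parse_prompt_structure_py parse_prompt_structure_py_alt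
  have hmain := pv_header_foldl ((PySem.Str.split? prompt "\n").getD []) [] [] []
  simp only [List.nil_append] at hmain
  simp only [hmain, pvI, pvJ]
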